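-- pv_equiv track=rewrite | github.com/axiomabsolute/AdventOfCode2020 | day-twenty/python/day_twenty.py | index_by_border
-- ===== SOURCE A (Python) =====
-- from collections import defaultdict
--
-- def get_borders(tile_rows):
--     north = tile_rows[0]
--     south = tile_rows[-1]
--     west = ''.join(t[0] for t in tile_rows)
--     east = ''.join(t[:-1] for t in tile_rows)
--     height = len(tile_rows)
--     width = len(tile_rows[0])
--     inner = tuple(''.join(tile_rows[i][1:width-1]) for i in range(1, height-1))
--     return north, east, south, west, inner
--
-- def index_by_border(tiles):
--     """Given a dictionary of tile_id->rows, return a dictionary mapping       cardinal_direction->border_string->List[tile_id]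
--     """
--     by_border = {
--         "north": defaultdict(lambda: []),
--         "east": defaultdict(lambda: []),
--         "south": defaultdict(lambda: []),
--         "west": defaultdict(lambda: []),
--     }
--     borders = {}
--     inners = {}
--     for tile_id, tile_rows in tiles.items():
--         north, east, south, west, inner = get_borders(tile_rows)
--         by_border["north"][north].append(tile_id)
--         by_border["east"][east].append(tile_id)
--         by_border["south"][south].append(tile_id)
--         by_border["west"][west].append(tile_id)
--         inners[tile_id] = inner
--         borders[tile_id] = (north, east, south, west)
--     return by_border, borders, inners
-- ===== SOURCE B (Python) =====
-- def get_borders(tile_rows):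
--     north = tile_rows[0]
--     south = tile_rows[-1]
--     west = ''.join(t[0] for t in tile_rows)
--     east = ''.join(t[:-1] for t in tile_rows)
--     height = len(tile_rows)
--     width = len(tile_rows[0])
--     inner = tuple(''.join(tile_rows[i][1:width-1]) for i in range(1, height-1))
--     return north, east, south, west, inner
--
-- def index_by_border(tiles):
--     """Given a dictionary of tile_id->rows, return a dictionary mapping       cardinal_direction->border_string->List[tile_id]
--     """
--     ids = list(tiles)
--     feats = [get_borders(rows) for rows in tiles.values()]
--     borders = dict(zip(ids, (f[:4] for f in feats)))
--     inners = dict(zip(ids, (f[4] for f in feats)))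
--     by_border = {
--         direction: {k: [tid for tid, g in zip(ids, feats) if g[i] == k]
--                     for k in dict.fromkeys(f[i] for f in feats)}
--         for i, direction in enumerate(["north", "east", "south", "west"])
--     }
--     return by_border, borders, inners
-- ===== Notes on version B (the rewrite author's own statement) =====
-- stated objective: alternative
-- what changed: A builds the result in one imperative pass that mutates four defaultdicts plus the borders/inners dicts per tile; B is a declarative comprehension pipeline: it computes each tile's feature tuple once, builds borders/inners by zipping ids with projected features, and builds by_border per direction by deduplicating the border keys with dict.fromkeys and rescanning all tiles per distinct key (no mutable grouping state at all).
import Mathlib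
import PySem

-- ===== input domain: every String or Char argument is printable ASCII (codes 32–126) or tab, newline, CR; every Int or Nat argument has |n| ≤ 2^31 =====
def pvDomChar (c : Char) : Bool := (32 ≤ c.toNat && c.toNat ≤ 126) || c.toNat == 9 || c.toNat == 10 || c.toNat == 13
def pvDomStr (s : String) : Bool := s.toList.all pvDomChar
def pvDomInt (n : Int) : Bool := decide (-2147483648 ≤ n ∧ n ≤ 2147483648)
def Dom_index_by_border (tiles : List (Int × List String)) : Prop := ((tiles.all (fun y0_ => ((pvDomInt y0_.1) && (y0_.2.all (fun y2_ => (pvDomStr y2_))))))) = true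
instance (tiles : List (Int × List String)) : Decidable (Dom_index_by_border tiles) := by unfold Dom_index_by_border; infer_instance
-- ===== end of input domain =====

-- B replaces A's single imperative pass over mutable defaultdicts by a declarative,
-- comprehension-only computation: features once per tile, then for each direction the distinct
-- border keys (dict.fromkeys) and a per-key rescan of all tiles (objective: alternative).

-- ===== PORT A =====

-- t[0] as a 1-character string; total form of the IndexError-raising index, exact under Pre_
-- (every row is a nonempty string)
def pyStrGet0 (t : String) : String :=
  match PySem.Str.pyGet? t 0 with
  | some c => String.ofList [c]
  | none => ""

def get_borders (tile_rows : List String) :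
    String × String × String × String × List String :=
  let north := PySem.List.pyGetD tile_rows 0 ""
  let south := PySem.List.pyGetD tile_rows (-1) ""
  let west := PySem.Str.join "" (tile_rows.map (fun t => pyStrGet0 t))
  let east := PySem.Str.join "" (tile_rows.map (fun t => PySem.Str.slice t none (some (-1))))
  let height : Int := PySem.List.len tile_rows
  let width : Int := PySem.Str.len (PySem.List.pyGetD tile_rows 0 "")
  -- ''.join over one row's characters is that row's slice itself
  let inner := (PySem.List.pyRange 1 (height - 1)).map
      (fun i => PySem.Str.slice (PySem.List.pyGetD tile_rows i "") (some 1) (some (width - 1)))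
  (north, east, south, west, inner)

-- one iteration of A's loop: four defaultdict appends + the two dict writes
-- (defaultdict's by_border[dir][key].append(tid) is modify key with default [] appending tid)
def ibbStepA
    (st : PySem.Dict String (List Int) × PySem.Dict String (List Int) ×
          PySem.Dict String (List Int) × PySem.Dict String (List Int) ×
          PySem.Dict Int (String × String × String × String) × PySem.Dict Int (List String))
    (p : Int × List String) :
    PySem.Dict String (List Int) × PySem.Dict String (List Int) ×
    PySem.Dict String (List Int) × PySem.Dict String (List Int) ×
    PySem.Dict Int (String × String × String × String) × PySem.Dict Int (List String) :=
  let b := get_borders p.2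
  (st.1.modify b.1 [] (· ++ [p.1]),
   st.2.1.modify b.2.1 [] (· ++ [p.1]),
   st.2.2.1.modify b.2.2.1 [] (· ++ [p.1]),
   st.2.2.2.1.modify b.2.2.2.1 [] (· ++ [p.1]),
   st.2.2.2.2.1.insert p.1 (b.1, b.2.1, b.2.2.1, b.2.2.2.1),
   st.2.2.2.2.2.insert p.1 b.2.2.2.2)

-- by_border's outer dict has the four fixed keys "north".."west" in that insertion order
def index_by_border (tiles : List (Int × List String)) :
    (List (String × List (String × List Int))) × (List (Int × String × String × String × String)) × (List (Int × List String)) :=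
  let st := tiles.foldl ibbStepA
    (PySem.Dict.empty, PySem.Dict.empty, PySem.Dict.empty, PySem.Dict.empty,
     PySem.Dict.empty, PySem.Dict.empty)
  ([("north", st.1.items), ("east", st.2.1.items),
    ("south", st.2.2.1.items), ("west", st.2.2.2.1.items)],
   st.2.2.2.2.1.items, st.2.2.2.2.2.items)

-- ===== PORT B =====

-- g[i] on a tile's 5-tuple feature (i comes from enumerate, always 0..3)
def ibbProj (i : Int) (f : String × String × String × String × List String) : String :=
  if i = 0 then f.1 else if i = 1 then f.2.1 else if i = 2 then f.2.2.1 else f.2.2.2.1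

def index_by_border_alt (tiles : List (Int × List String)) :
    (List (String × List (String × List Int))) × (List (Int × String × String × String × String)) × (List (Int × List String)) :=
  let ids := tiles.map Prod.fst
  let feats := tiles.map (fun p => get_borders p.2)
  let borders := PySem.Dict.ofList (ids.zip (feats.map (fun f => (f.1, f.2.1, f.2.2.1, f.2.2.2.1))))
  let inners := PySem.Dict.ofList (ids.zip (feats.map (fun f => f.2.2.2.2)))
  -- dict comprehension over the (distinct) keys of dict.fromkeys: a pair per key, in order
  let by_border := (PySem.List.enumerate ["north", "east", "south", "west"]).map
    (fun q => (q.2,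
      (PySem.List.dedup (feats.map (fun f => ibbProj q.1 f))).map
        (fun k => (k, ((ids.zip feats).filter (fun t => ibbProj q.1 t.2 == k)).map Prod.fst))))
  (by_border, borders.items, inners.items)

-- ===== PRECONDITION & SPEC =====
-- Pre_ excludes (a) tiles whose row list is empty or contains an empty row string, on which A
-- raises IndexError (tile_rows[0] / t[0] in get_borders), and (b) association lists with
-- duplicate tile ids, which do not represent a Python dict (A's input is a dict, so these
-- inputs are unreachable for the Python programs).
def Pre_index_by_border (tiles : List (Int × List String)) : Prop :=
  (tiles.map Prod.fst).Nodup ∧ ∀ p ∈ tiles, p.2 ≠ [] ∧ ∀ r ∈ p.2, r ≠ ""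
instance (tiles : List (Int × List String)) : Decidable (Pre_index_by_border tiles) := by
  unfold Pre_index_by_border; infer_instance

def pvWitness_index_by_border : (List (Int × List String)) :=
  [(7, ["##.", ".#.", "..#"]), (3, ["#.", ".#"])]

def Spec_index_by_border (tiles : List (Int × List String)) (out : (List (String × List (String × List Int))) × (List (Int × String × String × String × String)) × (List (Int × List String))) : Prop := out = index_by_border_alt tiles
instance (tiles : List (Int × List String)) (out : (List (String × List (String × List Int))) × (List (Int × String × String × String × String)) × (List (Int × List String))) : Decidable (Spec_index_by_border tiles out) := by
  unfold Spec_index_by_border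
  have h1 : DecidableEq (List (String × List (String × List Int))) := inferInstance
  have h2 : DecidableEq (List (Int × String × String × String × String)) := inferInstance
  have h3 : DecidableEq (List (Int × List String)) := inferInstance
  exact @instDecidableEqProd _ _ h1 (@instDecidableEqProd _ _ h2 h3) _ _

-- ===== CLAIM (what is proved, stated in full; the proofs are below) =====
def Claim_equal_index_by_border : Prop := ∀ (tiles : List (Int × List String)), Dom_index_by_border tiles → Pre_index_by_border tiles → Spec_index_by_border tiles (index_by_border tiles)

-- ===== LEMMAS AND PROOFS =====

-- A's six dicts evolve independently: the fold splits componentwise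
theorem foldA_split (l : List (Int × List String)) (s) :
    l.foldl ibbStepA s =
      (l.foldl (fun d p => d.modify (get_borders p.2).1 [] (· ++ [p.1])) s.1,
       l.foldl (fun d p => d.modify (get_borders p.2).2.1 [] (· ++ [p.1])) s.2.1,
       l.foldl (fun d p => d.modify (get_borders p.2).2.2.1 [] (· ++ [p.1])) s.2.2.1,
       l.foldl (fun d p => d.modify (get_borders p.2).2.2.2.1 [] (· ++ [p.1])) s.2.2.2.1,
       l.foldl (fun d p => d.insert p.1 ((get_borders p.2).1, (get_borders p.2).2.1, (get_borders p.2).2.2.1, (get_borders p.2).2.2.2.1)) s.2.2.2.2.1,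
       l.foldl (fun d p => d.insert p.1 (get_borders p.2).2.2.2.2) s.2.2.2.2.2) := by
  induction l generalizing s with
  | nil => rfl
  | cons p l ih => rw [List.foldl_cons, ih]; rfl

-- A's grouping loop (modify with default [] appending the id), characterised:
-- keys in first-occurrence order, each key paired with all its ids in order
theorem group_items (l : List (String × Int)) :
    (l.foldl (fun d q => d.modify q.1 [] (fun x => x ++ [q.2])) (PySem.Dict.empty : PySem.Dict String (List Int))).items
    = (PySem.List.dedup (l.map Prod.fst)).map
        (fun k => (k, (l.filter (fun q => q.1 == k)).map Prod.snd)) := by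
  have hnd : (l.foldl (fun d q => d.modify q.1 [] (fun x => x ++ [q.2])) (PySem.Dict.empty : PySem.Dict String (List Int))).keys.Nodup :=
    PySem.Dict.nodup_keys_foldl_modify_key l Prod.fst [] (fun _ q => (fun x => x ++ [q.2])) PySem.Dict.empty PySem.Dict.nodup_keys_empty
  have hkeys : (l.foldl (fun d q => d.modify q.1 [] (fun x => x ++ [q.2])) (PySem.Dict.empty : PySem.Dict String (List Int))).keys = PySem.List.dedup (l.map Prod.fst) :=
    PySem.Dict.keys_foldl_modify_key l Prod.fst [] (fun _ q => (fun x => x ++ [q.2])) PySem.Dict.empty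
  rw [PySem.Dict.items_eq_map_keys _ hnd [], hkeys]
  refine List.map_congr_left (fun k _ => ?_)
  rw [PySem.Dict.getD_foldl_modify_append]
  simp [PySem.Dict.getD_empty]

-- one direction: A's grouping fold over tiles equals B's dedup-keys + per-key rescan
theorem dir_group (tiles : List (Int × List String)) (i : Int) :
    (tiles.foldl (fun d p => d.modify (ibbProj i (get_borders p.2)) [] (· ++ [p.1]))
        (PySem.Dict.empty : PySem.Dict String (List Int))).items
    = (PySem.List.dedup ((tiles.map (fun p => get_borders p.2)).map (fun f => ibbProj i f))).map
        (fun k => (k, (((tiles.map Prod.fst).zip (tiles.map (fun p => get_borders p.2))).filter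
            (fun t => ibbProj i t.2 == k)).map Prod.fst)) := by
  have h := group_items (tiles.map (fun p => (ibbProj i (get_borders p.2), p.1)))
  simp only [List.foldl_map, List.map_map, List.filter_map, Function.comp_def] at h
  rw [h, List.zip_map']
  simp only [List.filter_map, List.map_map, Function.comp_def]

-- dict(pairs) built from tiles' keys and per-tile values is A's insert loop
theorem ofList_zip_eq_fold {ν : Type} (tiles : List (Int × List String))
    (v : Int × List String → ν) :
    PySem.Dict.ofList ((tiles.map Prod.fst).zip (tiles.map v))
      = tiles.foldl (fun d p => d.insert p.1 (v p)) PySem.Dict.empty := by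
  rw [List.zip_map']
  simp only [PySem.Dict.ofList, PySem.Dict.update, List.foldl_map]

theorem main_eq (tiles : List (Int × List String)) :
    index_by_border tiles = index_by_border_alt tiles := by
  unfold index_by_border index_by_border_alt
  rw [foldA_split]
  dsimp only
  refine congrArg₂ Prod.mk ?_ (congrArg₂ Prod.mk ?_ ?_)
  · show [("north", (tiles.foldl (fun d p => d.modify (ibbProj 0 (get_borders p.2)) [] (· ++ [p.1])) (PySem.Dict.empty : PySem.Dict String (List Int))).items),
          ("east", (tiles.foldl (fun d p => d.modify (ibbProj 1 (get_borders p.2)) [] (· ++ [p.1])) (PySem.Dict.empty : PySem.Dict String (List Int))).items),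
          ("south", (tiles.foldl (fun d p => d.modify (ibbProj 2 (get_borders p.2)) [] (· ++ [p.1])) (PySem.Dict.empty : PySem.Dict String (List Int))).items),
          ("west", (tiles.foldl (fun d p => d.modify (ibbProj 3 (get_borders p.2)) [] (· ++ [p.1])) (PySem.Dict.empty : PySem.Dict String (List Int))).items)] = _
    rw [dir_group tiles 0, dir_group tiles 1, dir_group tiles 2, dir_group tiles 3]
    rfl
  · simp only [List.map_map]
    exact (congrArg PySem.Dict.items (ofList_zip_eq_fold tiles _)).symm
  · simp only [List.map_map]
    exact (congrArg PySem.Dict.items (ofList_zip_eq_fold tiles _)).symm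

-- ===== VERDICT (by name: the statement is the Claim_ definition above) =====
theorem index_by_border_spec : Claim_equal_index_by_border := by
  intro tiles _ _
  unfold Spec_index_by_border
  exact main_eq tiles
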